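-- pv_equiv track=rewrite | github.com/Askaholic/cryptopals | lib.py | ascii_freq_hist_likelyhood_score
-- ===== SOURCE A (Python) =====
-- import string
--
-- def ascii_freq_hist_likelyhood_score(hist):
--     score = 0
--     weights = {
--         "lowercase": 4,
--         "uppercase": 3,
--         "numbers": 2,
--         "other": 1
--     }
--     for i, num in enumerate(hist):
--         char = chr(i)
--         curr_score = 0
--         if char in string.ascii_lowercase:
--             curr_score = weights['lowercase']
--         elif char in string.ascii_uppercase or char == " ":
--             curr_score = weights['uppercase']
--         elif char in string.digits or char == "_":
--             curr_score = weights['numbers']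
--         elif char in string.printable:
--             curr_score = weights['other']
--
--         score += curr_score * num
--     return score
-- ===== SOURCE B (Python) =====
-- import string
--
-- # B: classification runs once to build a 128-entry weight table;
-- # scoring is then a single branch-free dot product over the histogram.
-- WEIGHTS = []
-- for _c in range(128):
--     _ch = chr(_c)
--     if _ch in string.ascii_lowercase:
--         _w = 4
--     elif _ch in string.ascii_uppercase or _ch == " ":
--         _w = 3
--     elif _ch in string.digits or _ch == "_":
--         _w = 2
--     elif _ch in string.printable:
--         _w = 1
--     else:
--         _w = 0
--     WEIGHTS.append(_w)
--
-- def ascii_freq_hist_likelyhood_score(hist):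
--     return sum((WEIGHTS[i] if i < 128 else 0) * num for i, num in enumerate(hist))
-- ===== Notes on version B (the rewrite author's own statement) =====
-- stated objective: simpler
-- what changed: B precomputes a 128-entry weight table once (the four-way classification runs over codepoints 0..127 at setup) and scores the histogram with a single branch-free dot product, instead of A's per-element string-membership scans and if/elif chain inside the loop.
import Mathlib
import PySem

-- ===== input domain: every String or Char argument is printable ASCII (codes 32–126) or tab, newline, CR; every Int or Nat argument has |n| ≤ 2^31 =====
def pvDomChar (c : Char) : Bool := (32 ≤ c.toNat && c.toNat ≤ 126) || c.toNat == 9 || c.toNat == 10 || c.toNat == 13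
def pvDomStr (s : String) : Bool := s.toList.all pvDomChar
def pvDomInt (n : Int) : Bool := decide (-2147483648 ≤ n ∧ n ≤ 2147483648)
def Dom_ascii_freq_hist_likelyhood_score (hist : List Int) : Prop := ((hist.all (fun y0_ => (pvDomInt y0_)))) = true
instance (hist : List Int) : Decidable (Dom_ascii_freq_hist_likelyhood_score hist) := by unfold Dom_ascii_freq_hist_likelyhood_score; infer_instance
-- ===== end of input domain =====

set_option maxRecDepth 20000
set_option maxHeartbeats 1000000

-- B separates the work into a precomputed 128-entry weight table plus a branch-free
-- dot product over the histogram, instead of A's per-element membership scans (objective: simpler).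


-- ===== PORT A =====
-- string.ascii_lowercase / ascii_uppercase / digits / printable as lists of chars
def pvLowercase : List Char := "abcdefghijklmnopqrstuvwxyz".toList
def pvUppercase : List Char := "ABCDEFGHIJKLMNOPQRSTUVWXYZ".toList
def pvDigits : List Char := "0123456789".toList
def pvPrintable : List Char :=
  "0123456789abcdefghijklmnopqrstuvwxyzABCDEFGHIJKLMNOPQRSTUVWXYZ!\"#$%&'()*+,-./:;<=>?@[\\]^_`{|}~ \t\n\x0d\x0b\x0c".toList

def ascii_freq_hist_likelyhood_score (hist : List Int) : Int :=
  let weights : PySem.Dict String Int :=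
    (((PySem.Dict.empty.insert "lowercase" 4).insert "uppercase" 3).insert "numbers" 2).insert "other" 1
  (PySem.List.enumerate hist 0).foldl (fun score p =>
    let char := Char.ofNat p.1.toNat   -- chr(i); i ≥ 0 here
    let curr_score : Int :=
      if char ∈ pvLowercase then PySem.Dict.getD weights "lowercase" 0
      else if char ∈ pvUppercase ∨ char = ' ' then PySem.Dict.getD weights "uppercase" 0
      else if char ∈ pvDigits ∨ char = '_' then PySem.Dict.getD weights "numbers" 0
      else if char ∈ pvPrintable then PySem.Dict.getD weights "other" 0
      else 0
    score + curr_score * p.2) 0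

-- ===== PORT B =====
-- the module-level WEIGHTS table of Source B: classification run once over codes 0..127
def pvWeightsTable : List Int :=
  (PySem.List.pyRange 0 128 1).foldl (fun acc c =>
    let ch := Char.ofNat c.toNat
    let w : Int :=
      if ch ∈ pvLowercase then 4
      else if ch ∈ pvUppercase ∨ ch = ' ' then 3
      else if ch ∈ pvDigits ∨ ch = '_' then 2
      else if ch ∈ pvPrintable then 1
      else 0
    acc ++ [w]) []

def ascii_freq_hist_likelyhood_score_alt (hist : List Int) : Int :=
  (PySem.List.enumerate hist 0).foldl (fun s p =>
    s + (if p.1 < 128 then PySem.List.pyGetD pvWeightsTable p.1 0 else 0) * p.2) 0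

-- ===== PRECONDITION & SPEC =====
-- A raises ValueError (chr(i) with i ≥ 0x110000) on histograms longer than 0x110000; Pre_ excludes exactly those.
def Pre_ascii_freq_hist_likelyhood_score (hist : List Int) : Prop := hist.length ≤ 1114112
instance (hist : List Int) : Decidable (Pre_ascii_freq_hist_likelyhood_score hist) := by unfold Pre_ascii_freq_hist_likelyhood_score; infer_instance
def pvWitness_ascii_freq_hist_likelyhood_score : List Int := [3, 1, -2, 7]

def Spec_ascii_freq_hist_likelyhood_score (hist : List Int) (out : Int) : Prop := out = ascii_freq_hist_likelyhood_score_alt hist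
instance (hist : List Int) (out : Int) : Decidable (Spec_ascii_freq_hist_likelyhood_score hist out) := by unfold Spec_ascii_freq_hist_likelyhood_score; infer_instance

-- ===== CLAIM (what is proved, stated in full; the proofs are below) =====
def Claim_equal_ascii_freq_hist_likelyhood_score : Prop := ∀ (hist : List Int), Dom_ascii_freq_hist_likelyhood_score hist → Pre_ascii_freq_hist_likelyhood_score hist → Spec_ascii_freq_hist_likelyhood_score hist (ascii_freq_hist_likelyhood_score hist)

-- ===== LEMMAS AND PROOFS =====

-- A's four-way classification of one character, and A's per-element weight per index
def pvClass (ch : Char) : Int :=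
  if ch ∈ pvLowercase then 4
  else if ch ∈ pvUppercase ∨ ch = ' ' then 3
  else if ch ∈ pvDigits ∨ ch = '_' then 2
  else if ch ∈ pvPrintable then 1
  else 0

def pvWA (i : Int) : Int := pvClass (Char.ofNat i.toNat)

-- B's per-element weight
def pvWB (i : Int) : Int :=
  if i < 128 then PySem.List.pyGetD pvWeightsTable i 0 else 0

lemma pvWeightsTable_eq_map :
    pvWeightsTable = (PySem.List.pyRange 0 128 1).map pvWA := by
  unfold pvWeightsTable
  rw [PySem.List.foldl_append_singleton_eq_map]
  rw [List.nil_append]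
  rfl

lemma pvTable_lookup (i : Int) (h0 : 0 ≤ i) (h1 : i < 128) :
    PySem.List.pyGetD pvWeightsTable i 0 = pvWA i := by
  rw [pvWeightsTable_eq_map]
  exact PySem.List.pyGetD_map_pyRange_of_nonneg pvWA 128 i 0 h0 h1

-- every character of the four ASCII strings has code < 128, and none is NUL
lemma pvMem_lt_128_all : (pvLowercase ++ pvUppercase ++ pvDigits ++ pvPrintable ++ [' ', '_']).all
    (fun c => decide (0 < c.toNat ∧ c.toNat < 128)) = true := by
  decide

lemma pvMem_lt_128 : ∀ c ∈ pvLowercase ++ pvUppercase ++ pvDigits ++ pvPrintable ++ [' ', '_'],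
    0 < c.toNat ∧ c.toNat < 128 := by
  have h := pvMem_lt_128_all
  rw [List.all_eq_true] at h
  intro c hc
  exact of_decide_eq_true (h c hc)

-- chr(i) for i ≥ 128: Char.ofNat gives either the real codepoint (toNat = i ≥ 128) or NUL (toNat = 0)
lemma pvOfNat_big (n : Nat) (_h : 128 ≤ n) :
    (Char.ofNat n).toNat = n ∨ (Char.ofNat n).toNat = 0 := by
  unfold Char.ofNat
  split
  · left; rfl
  · right; rfl

lemma pvWA_big (i : Int) (h : 128 ≤ i) : pvWA i = 0 := by
  have hn : 128 ≤ i.toNat := by omega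
  have hv := pvOfNat_big i.toNat hn
  set c := Char.ofNat i.toNat with hc
  have hbad : ¬ (0 < c.toNat ∧ c.toNat < 128) := by omega
  have h1 : c ∉ pvLowercase := fun hm => hbad (pvMem_lt_128 c
    (List.mem_append_left _ (List.mem_append_left _ (List.mem_append_left _ (List.mem_append_left _ hm)))))
  have h2 : c ∉ pvUppercase := fun hm => hbad (pvMem_lt_128 c
    (List.mem_append_left _ (List.mem_append_left _ (List.mem_append_left _ (List.mem_append_right _ hm)))))
  have h3 : c ∉ pvDigits := fun hm => hbad (pvMem_lt_128 c
    (List.mem_append_left _ (List.mem_append_left _ (List.mem_append_right _ hm))))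
  have h4 : c ∉ pvPrintable := fun hm => hbad (pvMem_lt_128 c
    (List.mem_append_left _ (List.mem_append_right _ hm)))
  have h5 : c ≠ ' ' := fun he => hbad (pvMem_lt_128 c
    (List.mem_append_right _ (he ▸ List.mem_cons_self)))
  have h6 : c ≠ '_' := fun he => hbad (pvMem_lt_128 c
    (List.mem_append_right _ (he ▸ List.mem_cons_of_mem _ List.mem_cons_self)))
  show pvClass c = 0
  unfold pvClass
  rw [if_neg h1, if_neg (not_or.mpr ⟨h2, h5⟩), if_neg (not_or.mpr ⟨h3, h6⟩), if_neg h4]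

-- the two weight functions agree on every index produced by enumerate
lemma pvW_eq (i : Int) (h0 : 0 ≤ i) : pvWA i = pvWB i := by
  unfold pvWB
  by_cases h : i < 128
  · rw [if_pos h, pvTable_lookup i h0 h]
  · rw [if_neg h, pvWA_big i (by omega)]

-- A's dict lookups are the literal weights
lemma pvA_eq_fold : ∀ (l : List Int) (s : Int), 0 ≤ s → ∀ (acc : Int),
    (PySem.List.enumerate l s).foldl (fun score p =>
      score + pvWA p.1 * p.2) acc
    = (PySem.List.enumerate l s).foldl (fun sc p =>
      sc + (if p.1 < 128 then PySem.List.pyGetD pvWeightsTable p.1 0 else 0) * p.2) acc := by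
  intro l
  induction l with
  | nil => intro s _ acc; simp [PySem.List.enumerate_nil]
  | cons x t ih =>
      intro s hs acc
      rw [PySem.List.enumerate_cons]
      simp only [List.foldl_cons]
      rw [pvW_eq s hs]
      exact ih (s + 1) (by omega) _

-- ===== VERDICT (by name: the statement is the Claim_ definition above) =====
theorem ascii_freq_hist_likelyhood_score_spec : Claim_equal_ascii_freq_hist_likelyhood_score := by
  intro hist _ _
  unfold Spec_ascii_freq_hist_likelyhood_score
  unfold ascii_freq_hist_likelyhood_score ascii_freq_hist_likelyhood_score_alt
  exact pvA_eq_fold hist 0 (by omega) 0
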